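-- pv_equiv track=rewrite | github.com/sokirko74/vanya | movements.py | detect_movements
-- ===== SOURCE A (Python) =====
-- def check_fuzzy_increase(integers):
--     if len(integers) == 0:
--         return True
--     max_v = integers[0]
--     for v in integers:
--         if v > max_v:
--             max_v = v
--         elif max_v - v > 10:
--             return False
--     return True
--
-- def detect_hump(integers):
--     if len(integers) < 3:
--         return 0
--     max_value = max(integers)
--     max_index = [i for i,v in enumerate(integers) if v == max_value][0]
--     if max_index == 0 or max_index == len(integers) - 1:
--         return 0
--     rise = integers[0:max_index]
--     if max_value - min(rise) < 10   or not check_fuzzy_increase(rise):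
--         return 0
--     slope = integers[max_index:]
--     if max_value - min(slope) < 10 or not check_fuzzy_increase([-x for x in slope]):
--         return 0
--
--     return max_value - max((min(slope),min(rise)))
--
-- def detect_movements(points):
--     movements = dict()
--     v = detect_hump([y for (x, y) in points])
--     if v > 0:
--         movements["down"] = v
--     v = detect_hump([-y for (x, y) in points])
--     if v > 0:
--         movements["up"] = v
--     v = detect_hump([x for (x, y) in points])
--     if v > 0:
--         movements["right"] = v
--     v = detect_hump([-x for (x, y) in points])
--     if v > 0:
--         movements["left"] = v
--     return movements
-- ===== SOURCE B (Python) =====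
-- def detect_hump(integers):
--     # single left-to-right scan: track first max index, min of rise/slope and
--     # the fuzzy-monotone flags incrementally instead of slicing and rescanning
--     n = len(integers)
--     if n < 3:
--         return 0
--     maxv = integers[0]
--     idx = 0
--     rise_min, rise_fuzzy = maxv, True
--     slope_min, slope_ok = maxv, True
--     pre_min, pre_fuzzy = maxv, True
--     for pos in range(1, n):
--         v = integers[pos]
--         if v > maxv:
--             rise_min, rise_fuzzy = pre_min, pre_fuzzy
--             maxv, idx = v, pos
--             slope_min, slope_ok = v, True
--         else:
--             if v < slope_min:
--                 slope_min = v
--             elif v - slope_min > 10: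
--                 slope_ok = False
--             if maxv - v > 10:
--                 pre_fuzzy = False
--         if v < pre_min:
--             pre_min = v
--     if idx == 0 or idx == n - 1:
--         return 0
--     if maxv - rise_min < 10 or not rise_fuzzy:
--         return 0
--     if maxv - slope_min < 10 or not slope_ok:
--         return 0
--     return maxv - max(slope_min, rise_min)
--
-- def detect_movements(points):
--     movements = {}
--     for name, proj in (("down", lambda x, y: y), ("up", lambda x, y: -y),
--                        ("right", lambda x, y: x), ("left", lambda x, y: -x)):
--         v = detect_hump([proj(x, y) for (x, y) in points])
--         if v > 0:
--             movements[name] = v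
--     return movements
-- ===== Notes on version B (the rewrite author's own statement) =====
-- stated objective: alternative
-- what changed: detect_hump is rewritten as a single left-to-right scan that tracks the running max with its first index, the mins of the rising and falling parts, and both fuzzy-monotonicity flags incrementally, instead of computing max/first-index/slices and rescanning negated sublists with check_fuzzy_increase.
import Mathlib
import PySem

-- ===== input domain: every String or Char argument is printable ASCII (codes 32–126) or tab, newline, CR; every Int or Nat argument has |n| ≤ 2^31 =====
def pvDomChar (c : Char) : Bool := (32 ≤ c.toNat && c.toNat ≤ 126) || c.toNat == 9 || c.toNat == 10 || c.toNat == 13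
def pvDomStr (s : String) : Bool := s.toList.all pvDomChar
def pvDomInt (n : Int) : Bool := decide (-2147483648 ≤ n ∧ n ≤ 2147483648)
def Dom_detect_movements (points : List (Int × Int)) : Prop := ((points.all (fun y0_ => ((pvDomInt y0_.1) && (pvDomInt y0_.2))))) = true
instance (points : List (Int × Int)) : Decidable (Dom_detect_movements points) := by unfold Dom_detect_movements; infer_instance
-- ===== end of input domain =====

-- B rewrites detect_hump as a single left-to-right scan (objective: alternative decomposition — one pass,
-- no slicing/negating/rescanning); return values proved identical for all inputs.

-- ===== PORT A =====
def cfiLoop (maxv : Int) : List Int → Bool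
  | [] => true
  | v :: rest =>
    if v > maxv then cfiLoop v rest
    else if maxv - v > 10 then false
    else cfiLoop maxv rest

def check_fuzzy_increase (integers : List Int) : Bool :=
  match integers with
  | [] => true
  | h :: _ => cfiLoop h integers

def detect_hump (integers : List Int) : Int :=
  if integers.length < 3 then 0 else
  let max_value := (PySem.List.max? integers (fun x => x)).getD 0
  -- [i for i,v in enumerate(integers) if v == max_value][0]  (nonempty: max_value ∈ integers)
  let max_index : Int :=
    (((PySem.List.enumerate integers 0).filter (fun p => p.2 == max_value)).map (fun p => p.1)).headD 0
  if max_index == 0 || max_index == (integers.length : Int) - 1 then 0 else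
  let rise := PySem.List.slice integers (some 0) (some max_index)
  if max_value - (PySem.List.min? rise (fun x => x)).getD 0 < 10 || !(check_fuzzy_increase rise) then 0 else
  let slope := PySem.List.slice integers (some max_index) none
  if max_value - (PySem.List.min? slope (fun x => x)).getD 0 < 10
      || !(check_fuzzy_increase (slope.map (fun x => -x))) then 0 else
  max_value - max ((PySem.List.min? slope (fun x => x)).getD 0) ((PySem.List.min? rise (fun x => x)).getD 0)

def detect_movements (points : List (Int × Int)) : List (String × Int) :=
  let movements : PySem.Dict String Int := PySem.Dict.empty
  let v1 := detect_hump (points.map (fun p => p.2))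
  let movements := if v1 > 0 then movements.insert "down" v1 else movements
  let v2 := detect_hump (points.map (fun p => -p.2))
  let movements := if v2 > 0 then movements.insert "up" v2 else movements
  let v3 := detect_hump (points.map (fun p => p.1))
  let movements := if v3 > 0 then movements.insert "right" v3 else movements
  let v4 := detect_hump (points.map (fun p => -p.1))
  let movements := if v4 > 0 then movements.insert "left" v4 else movements
  movements.items

-- ===== PORT B =====
structure HState where
  maxv : Int
  idx : Int
  riseMin : Int
  riseFuzzy : Bool
  slopeMin : Int
  slopeOk : Bool
  preMin : Int
  preFuzzy : Bool
  pos : Int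
  deriving Repr, DecidableEq

def humpInit (a : Int) : HState := ⟨a, 0, a, true, a, true, a, true, 1⟩

def humpStep (s : HState) (v : Int) : HState :=
  if v > s.maxv then
    { maxv := v, idx := s.pos, riseMin := s.preMin, riseFuzzy := s.preFuzzy,
      slopeMin := v, slopeOk := true,
      preMin := if v < s.preMin then v else s.preMin, preFuzzy := s.preFuzzy, pos := s.pos + 1 }
  else
    { maxv := s.maxv, idx := s.idx, riseMin := s.riseMin, riseFuzzy := s.riseFuzzy,
      slopeMin := if v < s.slopeMin then v else s.slopeMin,
      slopeOk := if v < s.slopeMin then s.slopeOk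
                 else if v - s.slopeMin > 10 then false else s.slopeOk,
      preMin := if v < s.preMin then v else s.preMin,
      preFuzzy := if s.maxv - v > 10 then false else s.preFuzzy,
      pos := s.pos + 1 }

def detect_hump_alt (integers : List Int) : Int :=
  if integers.length < 3 then 0 else
  -- maxv = integers[0] (guard makes the list nonempty), then one scan over the rest
  let s := integers.tail.foldl humpStep (humpInit (integers.headD 0))
  if s.idx == 0 || s.idx == (integers.length : Int) - 1 then 0
  else if s.maxv - s.riseMin < 10 || !s.riseFuzzy then 0
  else if s.maxv - s.slopeMin < 10 || !s.slopeOk then 0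
  else s.maxv - max s.slopeMin s.riseMin

def detect_movements_alt (points : List (Int × Int)) : List (String × Int) :=
  let tasks : List (String × List Int) :=
    [("down", points.map (fun p => p.2)), ("up", points.map (fun p => -p.2)),
     ("right", points.map (fun p => p.1)), ("left", points.map (fun p => -p.1))]
  (tasks.foldl (fun d nl =>
      let v := detect_hump_alt nl.2
      if v > 0 then d.insert nl.1 v else d) (PySem.Dict.empty : PySem.Dict String Int)).items

-- ===== PRECONDITION & SPEC =====
def Spec_detect_movements (points : List (Int × Int)) (out : List (String × Int)) : Prop := out = detect_movements_alt points
instance (points : List (Int × Int)) (out : List (String × Int)) : Decidable (Spec_detect_movements points out) := by unfold Spec_detect_movements; infer_instance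

-- ===== CLAIM (what is proved, stated in full; the proofs are below) =====
def Claim_equal_detect_movements : Prop := ∀ (points : List (Int × Int)), Dom_detect_movements points → Spec_detect_movements points (detect_movements points)

-- ===== LEMMAS AND PROOFS =====
def minList : List Int → Int
  | [] => 0
  | h :: r => r.foldl min h

def firstIdx : List Int → Int → Int
  | [], _ => 0
  | v :: r, x => if v = x then 0 else firstIdx r x + 1

lemma firstIdx_nonneg (l : List Int) (x : Int) : 0 ≤ firstIdx l x := by
  induction l with
  | nil => simp [firstIdx]
  | cons v r ih => simp only [firstIdx]; split <;> omega

lemma firstIdx_lt_of_mem {l : List Int} {x : Int} (h : x ∈ l) : firstIdx l x < (l.length : Int) := by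
  induction l with
  | nil => simp at h
  | cons v r ih =>
    simp only [firstIdx, List.length_cons]
    split
    · push_cast; omega
    · rcases List.mem_cons.1 h with h | h
      · omega
      · have := ih h; push_cast; push_cast at this; omega

lemma firstIdx_append_of_mem {l : List Int} {x : Int} (q : List Int) (h : x ∈ l) :
    firstIdx (l ++ q) x = firstIdx l x := by
  induction l with
  | nil => simp at h
  | cons v r ih =>
    rcases List.mem_cons.1 h with h | h
    · simp [firstIdx, h.symm]
    · by_cases hv : v = x
      · simp [firstIdx, hv]
      · simp [firstIdx, hv, ih h]

lemma firstIdx_append_of_not_mem {l : List Int} {x : Int} (q : List Int) (h : x ∉ l) :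
    firstIdx (l ++ q) x = (l.length : Int) + firstIdx q x := by
  induction l with
  | nil => simp
  | cons v r ih =>
    have hv : v ≠ x := fun e => h (e ▸ List.mem_cons_self ..)
    have hr : x ∉ r := fun e => h (List.mem_cons_of_mem _ e)
    simp [firstIdx, hv, ih hr]; ring

lemma enumHead (l : List Int) (s x : Int) (h : x ∈ l) :
    (((PySem.List.enumerate l s).filter (fun p => p.2 == x)).map (fun p => p.1)).headD 0
      = s + firstIdx l x := by
  induction l generalizing s with
  | nil => simp at h
  | cons v r ih =>
    rw [PySem.List.enumerate_cons]
    by_cases hv : v = x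
    · simp [firstIdx, hv]
    · have hr : x ∈ r := by
        rcases List.mem_cons.1 h with h | h
        · exact absurd h.symm hv
        · exact h
      simp only [List.filter_cons]
      have hb : ((s, v).2 == x) = false := by simp [hv]
      rw [hb]
      simp only [firstIdx, hv, if_false]
      rw [if_neg (by trivial), ih (s + 1) hr]
      ring

lemma le_foldl_max' {a y : Int} {u : List Int} (h : y ∈ a :: u) : y ≤ u.foldl max a := by
  rcases List.mem_cons.1 h with h | h
  · exact h ▸ (PySem.List.le_foldl_max u a).1
  · exact (PySem.List.le_foldl_max u a).2 y h

lemma foldl_max_mem (a : Int) (u : List Int) : u.foldl max a ∈ a :: u :=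
  PySem.List.max?_mem (PySem.List.max?_id_cons a u)

lemma cfiLoop_append (v : Int) (xs : List Int) :
    ∀ m, cfiLoop m (xs ++ [v]) =
      (cfiLoop m xs && (decide (xs.foldl max m < v) || !decide (xs.foldl max m - v > 10))) := by
  induction xs with
  | nil =>
    intro m
    by_cases h1 : v > m <;> by_cases h2 : m - v > 10 <;> simp [cfiLoop, h1, h2]
  | cons x xs ih =>
    intro m
    simp only [List.cons_append, cfiLoop, List.foldl_cons]
    split_ifs with h1 h2
    · rw [ih x]; simp only [max_eq_right (le_of_lt h1)]
    · simp
    · rw [ih m]; simp only [max_eq_left (not_lt.1 h1)]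

lemma cfi_append (a v : Int) (u : List Int) :
    check_fuzzy_increase ((a :: u) ++ [v]) =
      (check_fuzzy_increase (a :: u) && (decide (u.foldl max a < v) || !decide (u.foldl max a - v > 10))) := by
  show cfiLoop a ((a :: u) ++ [v]) = _
  rw [cfiLoop_append v (a :: u) a]
  simp [check_fuzzy_increase, List.foldl_cons, max_self]

lemma cfi_singleton (x : Int) : check_fuzzy_increase [x] = true := by
  simp [check_fuzzy_increase, cfiLoop]

lemma foldl_max_neg (h : Int) (r : List Int) :
    (r.map (fun x => -x)).foldl max (-h) = -(r.foldl min h) := by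
  induction r generalizing h with
  | nil => rfl
  | cons y r ih =>
    simp only [List.map_cons, List.foldl_cons]
    rw [show max (-h) (-y) = -(min h y) from max_neg_neg h y]
    exact ih (min h y)

lemma minList_eq (q : List Int) (hq : q ≠ []) :
    (PySem.List.min? q (fun y => y)).getD 0 = minList q := by
  match q with
  | [] => exact absurd rfl hq
  | h :: r => rw [PySem.List.min?_id_cons]; rfl

lemma fold_inv (a : Int) (u : List Int) :
    (u.foldl humpStep (humpInit a)).pos = (u.length : Int) + 1 ∧
    (u.foldl humpStep (humpInit a)).maxv = u.foldl max a ∧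
    (u.foldl humpStep (humpInit a)).idx = firstIdx (a :: u) (u.foldl max a) ∧
    (u.foldl humpStep (humpInit a)).preMin = u.foldl min a ∧
    (u.foldl humpStep (humpInit a)).preFuzzy = check_fuzzy_increase (a :: u) ∧
    (u.foldl humpStep (humpInit a)).slopeMin
      = minList ((a :: u).drop (u.foldl humpStep (humpInit a)).idx.toNat) ∧
    (u.foldl humpStep (humpInit a)).slopeOk
      = check_fuzzy_increase (((a :: u).drop (u.foldl humpStep (humpInit a)).idx.toNat).map (fun x => -x)) ∧
    ((u.foldl humpStep (humpInit a)).idx ≠ 0 →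
      (u.foldl humpStep (humpInit a)).riseMin
        = minList ((a :: u).take (u.foldl humpStep (humpInit a)).idx.toNat) ∧
      (u.foldl humpStep (humpInit a)).riseFuzzy
        = check_fuzzy_increase ((a :: u).take (u.foldl humpStep (humpInit a)).idx.toNat)) := by
  induction u using List.reverseRecOn with
  | nil =>
    simp [humpInit, firstIdx, minList, check_fuzzy_increase, cfiLoop]
  | append_singleton u v ih =>
    obtain ⟨hpos, hmax, hidx, hpre, hfuz, hsm, hso, hrise⟩ := ih
    set s := u.foldl humpStep (humpInit a) with hs
    have hfold : (u ++ [v]).foldl humpStep (humpInit a) = humpStep s v := by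
      rw [List.foldl_append]; rfl
    rw [hfold]
    have hmem := foldl_max_mem a u
    have hidx0 : 0 ≤ s.idx := hidx ▸ firstIdx_nonneg _ _
    have hidxlt : s.idx < (u.length : Int) + 1 := by
      rw [hidx]; simpa using firstIdx_lt_of_mem hmem
    have hcons : a :: (u ++ [v]) = (a :: u) ++ [v] := rfl
    rw [hcons]
    by_cases hv : v > s.maxv
    · have hvM : u.foldl max a < v := by rw [← hmax]; exact hv
      simp only [humpStep, if_pos hv]
      have hnot : v ∉ a :: u := fun hm => absurd (le_foldl_max' hm) (not_le.2 hvM)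
      have htn : ((u.length : Int) + 1).toNat = u.length + 1 := by omega
      refine ⟨?_, ?_, ?_, ?_, ?_, ?_, ?_, ?_⟩
      · rw [hpos]; simp only [List.length_append, List.length_cons, List.length_nil]; omega
      · rw [List.foldl_append]
        simp only [List.foldl_cons, List.foldl_nil]
        exact (max_eq_right hvM.le).symm
      · rw [List.foldl_append]
        simp only [List.foldl_cons, List.foldl_nil]
        rw [max_eq_right hvM.le, firstIdx_append_of_not_mem _ hnot]
        simp only [firstIdx]
        rw [if_pos trivial, hpos]
        simp only [List.length_cons]; omega
      · rw [List.foldl_append]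
        simp only [List.foldl_cons, List.foldl_nil]
        rw [hpre]
        by_cases h' : v < u.foldl min a
        · rw [if_pos h', min_eq_right h'.le]
        · rw [if_neg h', min_eq_left (not_lt.1 h')]
      · rw [cfi_append, hfuz]; simp [hvM]
      · rw [hpos, htn]
        rw [List.drop_append_of_le_length (by simp),
          show u.length + 1 = (a :: u).length from rfl, List.drop_length]
        rfl
      · rw [hpos, htn]
        rw [List.drop_append_of_le_length (by simp),
          show u.length + 1 = (a :: u).length from rfl, List.drop_length]
        simp only [List.nil_append, List.map_cons, List.map_nil]
        exact (cfi_singleton _).symm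
      · intro _
        rw [hpos, htn, List.take_append_of_le_length (by simp),
          show u.length + 1 = (a :: u).length from rfl, List.take_length]
        exact ⟨hpre, hfuz⟩
    · have hvM : ¬ u.foldl max a < v := by rw [← hmax]; exact hv
      simp only [humpStep, if_neg hv]
      have hle : s.idx.toNat ≤ u.length := by omega
      have hle' : s.idx.toNat ≤ (a :: u).length := by simp; omega
      have hne : (a :: u).drop s.idx.toNat ≠ [] := by
        simp only [ne_eq, List.drop_eq_nil_iff, List.length_cons]; omega
      obtain ⟨h, r, hhr⟩ := List.exists_cons_of_ne_nil hne
      have hsm' : s.slopeMin = r.foldl min h := by rw [hsm, hhr]; rfl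
      have hso' : s.slopeOk = check_fuzzy_increase (-h :: r.map (fun x => -x)) := by
        rw [hso, hhr]; rfl
      refine ⟨?_, ?_, ?_, ?_, ?_, ?_, ?_, ?_⟩
      · rw [hpos]; simp only [List.length_append, List.length_cons, List.length_nil]; omega
      · rw [List.foldl_append]
        simp only [List.foldl_cons, List.foldl_nil]
        rw [max_eq_left (not_lt.1 hvM), hmax]
      · rw [List.foldl_append]
        simp only [List.foldl_cons, List.foldl_nil]
        rw [max_eq_left (not_lt.1 hvM), firstIdx_append_of_mem _ hmem]
        exact hidx
      · rw [List.foldl_append]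
        simp only [List.foldl_cons, List.foldl_nil]
        rw [hpre]
        by_cases h' : v < u.foldl min a
        · rw [if_pos h', min_eq_right h'.le]
        · rw [if_neg h', min_eq_left (not_lt.1 h')]
      · rw [cfi_append, hfuz, hmax]
        by_cases h10 : u.foldl max a - v > 10 <;> simp [h10, hvM]
      · rw [List.drop_append_of_le_length hle', hhr]
        simp only [minList, List.cons_append, List.foldl_append, List.foldl_cons, List.foldl_nil]
        rw [hsm']
        by_cases h' : v < r.foldl min h
        · rw [if_pos h', min_eq_right h'.le]
        · rw [if_neg h', min_eq_left (not_lt.1 h')]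
      · rw [List.drop_append_of_le_length hle', hhr]
        simp only [List.cons_append, List.map_append, List.map_cons, List.map_nil]
        rw [← List.cons_append, cfi_append, foldl_max_neg, ← hso']
        rw [show -(r.foldl min h) - -v = v - r.foldl min h from by ring]
        simp only [neg_lt_neg_iff, hsm']
        by_cases c1 : v < r.foldl min h <;> by_cases c2 : v - r.foldl min h > 10 <;>
          simp [c1, c2]
      · intro hne0
        rw [List.take_append_of_le_length hle']
        exact hrise hne0

lemma hump_eq (l : List Int) : detect_hump l = detect_hump_alt l := by
  match l with
  | [] => rfl
  | a :: t =>
    by_cases hlen : (a :: t).length < 3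
    · unfold detect_hump detect_hump_alt; rw [if_pos hlen, if_pos hlen]
    · unfold detect_hump detect_hump_alt
      rw [if_neg hlen, if_neg hlen]
      obtain ⟨hpos, hmax, hidx, hpre, hfuz, hsm, hso, hrise⟩ := fold_inv a t
      set s := t.foldl humpStep (humpInit a) with hs
      have hmem := foldl_max_mem a t
      have h0 : 0 ≤ s.idx := hidx ▸ firstIdx_nonneg _ _
      have hlt : s.idx < (t.length : Int) + 1 := by
        rw [hidx]; simpa using firstIdx_lt_of_mem hmem
      simp only [List.headD_cons, List.tail_cons, ← hs]
      rw [PySem.List.max?_id_cons]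
      simp only [Option.getD_some, ← hmax]
      have hmem' : s.maxv ∈ a :: t := hmax ▸ hmem
      have hidx' : s.idx = firstIdx (a :: t) s.maxv := by rw [hidx, hmax]
      simp only [enumHead (a :: t) 0 _ hmem', zero_add, ← hidx']
      by_cases hc : (s.idx == 0 || s.idx == ((a :: t).length : Int) - 1) = true
      · rw [if_pos hc, if_pos hc]
      · rw [if_neg hc, if_neg hc]
        simp only [Bool.or_eq_true, beq_iff_eq, not_or] at hc
        have hidxne : s.idx ≠ 0 := hc.1
        simp only [PySem.List.slice_zero_start]
        simp only [PySem.List.slice_to _ h0, PySem.List.slice_from _ h0]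
        have hrne : (a :: t).take s.idx.toNat ≠ [] := by
          intro hE
          rcases List.take_eq_nil_iff.1 hE with h' | h' <;>
            first
              | exact absurd h' (List.cons_ne_nil a t)
              | omega
        have hsne : (a :: t).drop s.idx.toNat ≠ [] := by
          simp only [ne_eq, List.drop_eq_nil_iff, List.length_cons, not_le]
          omega
        rw [minList_eq _ hrne, minList_eq _ hsne]
        obtain ⟨hrm, hrf⟩ := hrise hidxne
        rw [← hrm, ← hrf, ← hsm, ← hso]

-- ===== VERDICT (by name: the statement is the Claim_ definition above) =====
theorem detect_movements_spec : Claim_equal_detect_movements := by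
  intro points _
  unfold Spec_detect_movements
  simp only [detect_movements, detect_movements_alt, List.foldl_cons, List.foldl_nil, hump_eq]
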